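-- pv_equiv track=rewrite | github.com/chrisjune/algo-malgo | dfs_bfs/q6_surveilance.py | surveillance
-- ===== SOURCE A (Python) =====
-- from itertools import combinations
--
-- def hide(x, y, maps, direction):
--     dx = [0, 0, 1, -1]
--     dy = [1, -1, 0, 0]
--     nx, ny = x + dx[direction], y + dy[direction]
--
--     while 0 <= nx < len(maps) and 0 <= ny < len(maps[0]):
--         if maps[nx][ny] in ['s', 'o']:
--             break
--         if maps[nx][ny] == 't':
--             return False
--         nx, ny = nx + dx[direction], ny + dy[direction]
--
--     return True
--
-- def surveillance(maps):
--     choice = 3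
--     maps = [[i for i in m] for m in maps]
--     s_axis = []
--     emp_axis = []
--     for i in range(len(maps)):
--         for j in range(len(maps[0])):
--             if maps[i][j] == 's':
--                 s_axis.append((i, j))
--             if maps[i][j] == 'x':
--                 emp_axis.append((i, j))
--
--     emp_candidates = combinations(emp_axis, choice)
--     for cand in emp_candidates:
--         for c in cand:
--             x, y = c
--             maps[x][y] = 'o'
--
--         hidden = True
--         for q in s_axis:
--             x, y = q
--             if not hide(x, y, maps, 0) or not hide(x, y, maps, 1) or not hide(x, y, maps, 2) or not hide(x, y, maps, 3):
--                 hidden = False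
--
--         if hidden:
--             return hidden
--
--         for c in cand:
--             x, y = c
--             maps[x][y] = 'x'
--
--     return False
-- ===== SOURCE B (Python) =====
-- def surveillance(maps):
--     rows = len(maps)
--     cols = len(maps[0]) if maps else 0
--     grid = [list(r) for r in maps]
--     students = [(i, j) for i in range(rows) for j in range(cols) if grid[i][j] == 's']
--
--     def safe():
--         for x, y in students:
--             for dx, dy in ((0, 1), (0, -1), (1, 0), (-1, 0)):
--                 nx, ny = x + dx, y + dy
--                 while 0 <= nx < rows and 0 <= ny < cols:
--                     c = grid[nx][ny]
--                     if c == 's' or c == 'o':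
--                         break
--                     if c == 't':
--                         return False
--                     nx, ny = nx + dx, ny + dy
--         return True
--
--     def place(start, count):
--         if count == 3:
--             return safe()
--         for k in range(start, rows * cols):
--             i, j = divmod(k, cols)
--             if grid[i][j] == 'x':
--                 grid[i][j] = 'o'
--                 if place(k + 1, count + 1):
--                     return True
--                 grid[i][j] = 'x'
--         return False
--
--     return place(0, 0)
-- ===== Notes on version B (the rewrite author's own statement) =====
-- stated objective: alternative
-- what changed: Replaced itertools.combinations over a precollected list of empty cells plus flat place/check/restore loops by a recursive backtracking search over the grid's flat indices that places one wall at a time and runs an early-exit line-of-sight check once 3 walls are placed.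
import Mathlib
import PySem

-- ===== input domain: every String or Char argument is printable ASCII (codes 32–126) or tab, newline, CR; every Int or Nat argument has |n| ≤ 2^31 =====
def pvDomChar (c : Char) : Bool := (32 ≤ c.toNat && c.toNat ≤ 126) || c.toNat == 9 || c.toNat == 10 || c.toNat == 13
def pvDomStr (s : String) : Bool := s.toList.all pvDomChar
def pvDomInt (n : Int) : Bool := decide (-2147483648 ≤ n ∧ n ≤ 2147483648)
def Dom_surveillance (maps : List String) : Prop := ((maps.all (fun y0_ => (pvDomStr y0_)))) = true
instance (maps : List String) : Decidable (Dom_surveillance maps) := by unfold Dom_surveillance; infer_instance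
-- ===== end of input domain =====

-- B replaces itertools.combinations + flat placement loop by recursive backtracking over the grid
-- (place/restore one wall at a time); objective: alternative decomposition, same answers.

-- ===== PORT A =====
-- grid cell access (both Pythons index converted char grids the same way; in-bounds on Pre_)
def cellA (g : List (List Char)) (i j : Nat) : Char := (g.getD i []).getD j ' '

-- the nested scanning loop of both Pythons: row-major positions whose cell equals ch
def scanOf (g : List (List Char)) (rows cols : Nat) (ch : Char) : List (Nat × Nat) :=
  (List.range rows).flatMap (fun i =>
    (List.range cols).filterMap (fun j => if cellA g i j = ch then some (i, j) else none))

-- A's `while 0 <= nx < len(maps) and 0 <= ny < len(maps[0])` ray walk; fuel only makes the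
-- recursion structural (rows+cols+1 steps always suffice, the walk moves one cell per step)
def rayA (g : List (List Char)) (rows cols dx dy : Int) : Nat → Int → Int → Bool
  | 0, _, _ => true
  | fuel + 1, nx, ny =>
    if 0 ≤ nx ∧ nx < rows ∧ 0 ≤ ny ∧ ny < cols then
      let c := cellA g nx.toNat ny.toNat
      if c = 's' ∨ c = 'o' then true
      else if c = 't' then false
      else rayA g rows cols dx dy fuel (nx + dx) (ny + dy)
    else true

def hideA (x y : Int) (g : List (List Char)) (dir : Nat) : Bool :=
  let dxs : List Int := [0, 0, 1, -1]
  let dys : List Int := [1, -1, 0, 0]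
  let dx := dxs.getD dir 0
  let dy := dys.getD dir 0
  rayA g (g.length : Int) (((g.headD []).length : Nat) : Int) dx dy
    (g.length + (g.headD []).length + 1) (x + dx) (y + dy)

-- itertools.combinations in Python's order
def combosA : List (Nat × Nat) → Nat → List (List (Nat × Nat))
  | _, 0 => [[]]
  | [], _ + 1 => []
  | x :: xs, k + 1 => ((combosA xs k).map (fun c => x :: c)) ++ combosA xs (k + 1)

def setCell (g : List (List Char)) (i j : Nat) (c : Char) : List (List Char) :=
  g.set i ((g.getD i []).set j c)

-- `for c in cand: maps[x][y] = 'o'` (functional update instead of mutation; return value only)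
def placeWalls (g : List (List Char)) (cand : List (Nat × Nat)) : List (List Char) :=
  cand.foldl (fun g p => setCell g p.1 p.2 'o') g

-- A's `hidden` flag loop over s_axis (no early exit in A)
def checkA (g : List (List Char)) (s_axis : List (Nat × Nat)) : Bool :=
  s_axis.foldl (fun hidden q =>
    if !hideA (q.1 : Int) (q.2 : Int) g 0 || !hideA (q.1 : Int) (q.2 : Int) g 1 ||
       !hideA (q.1 : Int) (q.2 : Int) g 2 || !hideA (q.1 : Int) (q.2 : Int) g 3 then false
    else hidden) true

def surveillance (maps : List String) : Bool :=
  let g := maps.map String.toList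
  let rows := g.length
  let cols := (g.headD []).length
  let s_axis := scanOf g rows cols 's'
  let emp_axis := scanOf g rows cols 'x'
  (combosA emp_axis 3).any (fun cand => checkA (placeWalls g cand) s_axis)

-- ===== PORT B =====
-- B's inner while loop (same ray walk, written once in safe()); fuel as in rayA
def rayB (g : List (List Char)) (rows cols dx dy : Int) : Nat → Int → Int → Bool
  | 0, _, _ => true
  | fuel + 1, nx, ny =>
    if 0 ≤ nx ∧ nx < rows ∧ 0 ≤ ny ∧ ny < cols then
      let c := cellA g nx.toNat ny.toNat
      if c = 's' ∨ c = 'o' then true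
      else if c = 't' then false
      else rayB g rows cols dx dy fuel (nx + dx) (ny + dy)
    else true

-- B's safe(): early-exit double loop = all/all
def safeB (g : List (List Char)) (rows cols : Nat) (students : List (Nat × Nat)) : Bool :=
  students.all (fun q =>
    ([((0 : Int), (1 : Int)), (0, -1), (1, 0), (-1, 0)]).all (fun d =>
      rayB g (rows : Int) (cols : Int) d.1 d.2 (rows + cols + 1)
        ((q.1 : Int) + d.1) ((q.2 : Int) + d.2)))

-- B's place(start, count): the `for k in range(start, rows*cols)` loop ported as structural
-- recursion on the number of indices still to scan (rem = rows*cols - k)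
def placeB (rows cols : Nat) (students : List (Nat × Nat)) :
    Nat → List (List Char) → Nat → Nat → Bool
  | 0, g, _, count => if count = 3 then safeB g rows cols students else false
  | rem + 1, g, k, count =>
    if count = 3 then safeB g rows cols students
    else if cellA g (k / cols) (k % cols) = 'x' then
      if placeB rows cols students rem (setCell g (k / cols) (k % cols) 'o') (k + 1) (count + 1)
      then true
      else placeB rows cols students rem g (k + 1) count
    else placeB rows cols students rem g (k + 1) count

def surveillance_alt (maps : List String) : Bool :=
  let g := maps.map String.toList
  let rows := g.length
  let cols := (g.headD []).length
  let students := scanOf g rows cols 's'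
  placeB rows cols students (rows * cols) g 0 0

-- ===== PRECONDITION & SPEC =====
-- Pre_ excludes exactly the inputs where Python A raises IndexError: ragged inputs
-- with some row shorter than row 0 (maps[i][j] / maps[nx][ny]).
def Pre_surveillance (maps : List String) : Prop :=
  ∀ m ∈ maps, (maps.headD "").length ≤ m.length

instance (maps : List String) : Decidable (Pre_surveillance maps) := by
  unfold Pre_surveillance; infer_instance

def pvWitness_surveillance : List String := ["xxxs", "txxx"]

def Spec_surveillance (maps : List String) (out : Bool) : Prop := out = surveillance_alt maps
instance (maps : List String) (out : Bool) : Decidable (Spec_surveillance maps out) := by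
  unfold Spec_surveillance; infer_instance

-- ===== CLAIM (what is proved, stated in full; the proofs are below) =====
def Claim_equal_surveillance : Prop :=
  ∀ (maps : List String), Dom_surveillance maps → Pre_surveillance maps →
    Spec_surveillance maps (surveillance maps)

-- ===== LEMMAS AND PROOFS =====

theorem ray_eq (g : List (List Char)) (rows cols dx dy : Int) :
    ∀ fuel nx ny, rayB g rows cols dx dy fuel nx ny = rayA g rows cols dx dy fuel nx ny := by
  intro fuel
  induction fuel with
  | zero => intro nx ny; rfl
  | succ n ih => intro nx ny; simp only [rayA, rayB, ih]

theorem foldl_flag {α : Type} (P : α → Bool) (l : List α) (b : Bool) :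
    l.foldl (fun h q => if P q then false else h) b = (b && l.all (fun q => !P q)) := by
  induction l generalizing b with
  | nil => simp
  | cons x xs ih =>
      simp only [List.foldl_cons, List.all_cons, ih]
      by_cases h : P x <;> simp [h]

theorem check_eq_safe (g : List (List Char)) (s : List (Nat × Nat)) :
    checkA g s = safeB g g.length (g.headD []).length s := by
  unfold checkA safeB
  rw [foldl_flag]
  simp only [Bool.true_and]
  have hf : (fun (q : Nat × Nat) =>
      !(!hideA (q.1 : Int) (q.2 : Int) g 0 || !hideA (q.1 : Int) (q.2 : Int) g 1 ||
        !hideA (q.1 : Int) (q.2 : Int) g 2 || !hideA (q.1 : Int) (q.2 : Int) g 3)) =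
      (fun (q : Nat × Nat) =>
        ([((0 : Int), (1 : Int)), (0, -1), (1, 0), (-1, 0)]).all (fun d =>
          rayB g (g.length : Int) ((g.headD []).length : Int) d.1 d.2
            (g.length + (g.headD []).length + 1) ((q.1 : Int) + d.1) ((q.2 : Int) + d.2))) := by
    funext q
    simp only [List.all_cons, List.all_nil, ray_eq, hideA, List.getD, List.getElem?_cons_zero,
      List.getElem?_cons_succ, Option.getD_some, Bool.and_true]
    simp [Bool.and_assoc]
  rw [hf]

-- ---- proof-only helpers ----

theorem length_setCell (g : List (List Char)) (i j : Nat) (c : Char) :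
    (setCell g i j c).length = g.length := by simp [setCell]

theorem headlen_setCell (g : List (List Char)) (i j : Nat) (c : Char) :
    ((setCell g i j c).headD []).length = (g.headD []).length := by
  cases g with
  | nil => simp [setCell]
  | cons a as => cases i <;> simp [setCell, List.getD]

theorem cell_setCell_ne (g : List (List Char)) (i j i' j' : Nat) (c : Char)
    (h : i ≠ i' ∨ j ≠ j') : cellA (setCell g i j c) i' j' = cellA g i' j' := by
  unfold cellA setCell
  by_cases hi : i = i'
  · subst hi
    have hj : j ≠ j' := h.resolve_left (by simp)
    by_cases hlen : i < g.length
    · have h1 : (g.set i ((g.getD i []).set j c)).getD i [] = (g.getD i []).set j c := by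
        rw [List.getD_eq_getElem (hn := by simpa using hlen), List.getElem_set_self]
      rw [h1]
      simp only [List.getD_eq_getElem?_getD, List.getElem?_set_ne hj]
    · rw [List.set_eq_of_length_le (by omega)]
  · have h1 : (g.set i ((g.getD i []).set j c)).getD i' [] = g.getD i' [] := by
      simp only [List.getD_eq_getElem?_getD, List.getElem?_set_ne hi]
    rw [h1]

def empFrom (g : List (List Char)) (cols n k : Nat) : List (Nat × Nat) :=
  (List.range' k (n - k)).filterMap
    (fun t => if cellA g (t / cols) (t % cols) = 'x' then some (t / cols, t % cols) else none)

theorem flat_scan {α : Type} (c : Nat) (f : Nat → Nat → Option α) (r : Nat) :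
    (List.range r).flatMap (fun i => (List.range c).filterMap (fun j => f i j)) =
      (List.range (r * c)).filterMap (fun t => f (t / c) (t % c)) := by
  induction r with
  | zero => simp
  | succ n ih =>
    rcases Nat.eq_zero_or_pos c with hc | hc
    · subst hc; simp
    · rw [List.range_succ, List.flatMap_append, ih]
      have hmul : (n + 1) * c = n * c + c := by ring
      rw [hmul, List.range_add, List.filterMap_append]
      congr 1
      rw [List.flatMap_cons, List.flatMap_nil, List.append_nil, List.filterMap_map]
      apply List.filterMap_congr
      intro j hj
      have hjc : j < c := List.mem_range.mp hj
      have h1 : (n * c + j) / c = n := by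
        rw [Nat.mul_comm n c, Nat.mul_add_div hc, Nat.div_eq_of_lt hjc]
        omega
      have h2 : (n * c + j) % c = j := by
        rw [Nat.mul_comm n c, Nat.mul_add_mod, Nat.mod_eq_of_lt hjc]
      simp only [Function.comp, h1, h2]

theorem emp_setCell (g : List (List Char)) (cols n k : Nat) :
    empFrom (setCell g (k / cols) (k % cols) 'o') cols n (k + 1) = empFrom g cols n (k + 1) := by
  unfold empFrom
  apply List.filterMap_congr
  intro t ht
  have htk : k + 1 ≤ t := (List.mem_range'_1.mp ht).1
  have hne : k / cols ≠ t / cols ∨ k % cols ≠ t % cols := by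
    by_contra hcon
    push Not at hcon
    have e1 := Nat.div_add_mod t cols
    have e2 := Nat.div_add_mod k cols
    have : t = k := by
      rw [← e1, ← e2, hcon.1, hcon.2]
    omega
  rw [cell_setCell_ne _ _ _ _ _ _ hne]

theorem placeWalls_cons (g : List (List Char)) (p : Nat × Nat) (cand : List (Nat × Nat)) :
    placeWalls g (p :: cand) = placeWalls (setCell g p.1 p.2 'o') cand := rfl

theorem length_placeWalls (cand : List (Nat × Nat)) :
    ∀ g, (placeWalls g cand).length = g.length := by
  induction cand with
  | nil => intro g; rfl
  | cons p rest ih => intro g; rw [placeWalls_cons, ih, length_setCell]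

theorem headlen_placeWalls (cand : List (Nat × Nat)) :
    ∀ g, ((placeWalls g cand).headD []).length = (g.headD []).length := by
  induction cand with
  | nil => intro g; rfl
  | cons p rest ih => intro g; rw [placeWalls_cons, ih, headlen_setCell]

theorem if_bool_or (a b : Bool) : (if a then true else b) = (a || b) := by
  cases a <;> simp

theorem placeB_eq (rows cols : Nat) (students : List (Nat × Nat)) (rem : Nat) :
    ∀ k g count, count ≤ 3 → k + rem = rows * cols →
      placeB rows cols students rem g k count =
        (combosA (empFrom g cols (rows * cols) k) (3 - count)).any
          (fun cand => safeB (placeWalls g cand) rows cols students) := by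
  induction rem with
  | zero =>
    intro k g count h3 hf
    rw [placeB]
    by_cases hc : count = 3
    · subst hc
      simp [combosA, placeWalls]
    · rw [if_neg hc]
      have hm : 3 - count = (2 - count) + 1 := by omega
      have hz : rows * cols - k = 0 := by omega
      simp [empFrom, hz, hm, combosA]
  | succ rem ih =>
    intro k g count h3 hf
    rw [placeB]
    by_cases hc : count = 3
    · subst hc
      simp [combosA, placeWalls]
    · rw [if_neg hc]
      have hk : k < rows * cols := by omega
      have hcons : List.range' k (rows * cols - k) =
          k :: List.range' (k + 1) (rows * cols - (k + 1)) := by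
        have hsplit : rows * cols - k = (rows * cols - (k + 1)) + 1 := by omega
        rw [hsplit, List.range'_succ]
      have hm : 3 - count = (2 - count) + 1 := by omega
      by_cases hx : cellA g (k / cols) (k % cols) = 'x'
      · rw [if_pos hx]
        have h1 : empFrom g cols (rows * cols) k =
            (k / cols, k % cols) :: empFrom g cols (rows * cols) (k + 1) := by
          unfold empFrom
          rw [hcons, List.filterMap_cons, if_pos hx]
        rw [h1, hm]
        simp only [combosA, List.any_append, List.any_map]
        have ih1 := ih (k + 1) (setCell g (k / cols) (k % cols) 'o') (count + 1)
          (by omega) (by omega)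
        have ih2 := ih (k + 1) g count h3 (by omega)
        have hmm : 3 - (count + 1) = 2 - count := by omega
        rw [hmm] at ih1
        rw [hm] at ih2
        rw [emp_setCell g cols (rows * cols) k] at ih1
        rw [ih1, ih2, if_bool_or]
        rfl
      · rw [if_neg hx]
        have h1 : empFrom g cols (rows * cols) k = empFrom g cols (rows * cols) (k + 1) := by
          unfold empFrom
          rw [hcons, List.filterMap_cons, if_neg hx]
        rw [ih (k + 1) g count h3 (by omega), h1]

-- ===== VERDICT (by name: the statement is the Claim_ definition above) =====
theorem surveillance_spec : Claim_equal_surveillance := by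
  intro maps _ _
  unfold Spec_surveillance surveillance surveillance_alt
  simp only []
  set g := maps.map String.toList with hg
  set rows := g.length with hr
  set cols := (g.headD []).length with hcl
  rw [placeB_eq rows cols (scanOf g rows cols 's') (rows * cols) 0 g 0 (by omega) (by omega)]
  have hscan : scanOf g rows cols 'x' = empFrom g cols (rows * cols) 0 := by
    unfold scanOf empFrom
    rw [flat_scan]
    rw [Nat.sub_zero, ← List.range_eq_range']
  rw [hscan]
  have : (3 : Nat) - 0 = 3 := rfl
  rw [this]
  apply List.any_congr rfl
  intro cand
  rw [check_eq_safe, length_placeWalls, headlen_placeWalls]
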